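-- pv_equiv track=rewrite | github.com/CognitiveComputationLab/mptpy | mptpy/optimization/operations/substitution.py | apply_rgs
-- ===== SOURCE A (Python) =====
-- def apply_rgs(param, rgs, mpt_list):
--     rgs_idx = 0
--     for i, elem in enumerate(mpt_list):
--
--         if elem == param:
--             if rgs[rgs_idx] == 0:
--                 pass
--             else:
--                 mpt_list[i] += str(rgs[rgs_idx])
--             rgs_idx += 1
--
--     return mpt_list
-- ===== SOURCE B (Python) =====
-- def apply_rgs(param, rgs, mpt_list):
--     # Split mpt_list into the segments lying between matches of param;
--     # cur ends up holding the trailing segment after the last match.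
--     segs = []
--     cur = []
--     for e in mpt_list:
--         if e == param:
--             segs.append(cur)
--             cur = []
--         else:
--             cur.append(e)
--     # Reassemble: each segment, then param with the j-th rgs suffix appended (if nonzero).
--     out = []
--     for j, seg in enumerate(segs):
--         r = rgs[j]
--         out += seg
--         out.append(param if r == 0 else param + str(r))
--     out += cur
--     return out
-- ===== Notes on version B (the rewrite author's own statement) =====
-- stated objective: alternative
-- what changed: Instead of A's single in-place pass with a running rgs counter, B splits the list into the segments between matches and then reassembles a fresh list, interleaving each segment with param plus its rgs suffix.
import Mathlib
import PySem

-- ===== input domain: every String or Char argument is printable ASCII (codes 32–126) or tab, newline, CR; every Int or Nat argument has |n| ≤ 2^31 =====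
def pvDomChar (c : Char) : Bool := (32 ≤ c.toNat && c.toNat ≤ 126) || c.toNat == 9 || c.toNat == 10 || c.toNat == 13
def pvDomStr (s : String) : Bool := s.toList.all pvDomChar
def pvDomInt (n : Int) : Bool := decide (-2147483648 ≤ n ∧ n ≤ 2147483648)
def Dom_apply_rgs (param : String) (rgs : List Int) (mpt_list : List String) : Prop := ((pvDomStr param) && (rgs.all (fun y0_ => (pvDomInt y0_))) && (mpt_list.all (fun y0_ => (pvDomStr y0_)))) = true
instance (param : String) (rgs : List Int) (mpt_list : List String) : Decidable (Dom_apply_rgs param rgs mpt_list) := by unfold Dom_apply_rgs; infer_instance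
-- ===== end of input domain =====

-- B replaces A's single in-place pass with a running rgs counter by a split-and-reassemble scheme:
-- cut mpt_list into the segments between matches, then rebuild a fresh list interleaving each segment
-- with param plus its rgs suffix (objective: alternative decomposition, same cost). Python A mutates
-- mpt_list in place, B builds a fresh list: the equivalence proved here is about the return value.

-- ===== PORT A =====
-- A's for-loop over enumerate(mpt_list) with the running counter rgs_idx (here k).
-- rgs[rgs_idx] is rgs[k]; Pre_ guarantees it is in range (Python raises IndexError otherwise).
def applyRgsLoopA (param : String) (rgs : List Int) (k : Nat) : List String → List String
  | [] => []
  | e :: rest =>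
    if e = param then
      let r := (PySem.List.pyGet? rgs (k : Int)).getD 0
      (if r = 0 then e else e ++ PySem.Int.toStr r) :: applyRgsLoopA param rgs (k + 1) rest
    else e :: applyRgsLoopA param rgs k rest

def apply_rgs (param : String) (rgs : List Int) (mpt_list : List String) : List String :=
  applyRgsLoopA param rgs 0 mpt_list

-- ===== PORT B =====
-- Source B pass 1: the splitting loop over mpt_list, state (segs, cur).
def splitStateB (param : String) (mpt_list : List String) : List (List String) × List String :=
  mpt_list.foldl
    (fun st e => if e = param then (st.1 ++ [st.2], ([] : List String)) else (st.1, st.2 ++ [e]))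
    ([], [])

-- Source B pass 2: for j, seg in enumerate(segs): r = rgs[j]; out += seg; out.append(...)
-- rgs[j] is in range under Pre_ (Python raises IndexError otherwise).
def apply_rgs_alt (param : String) (rgs : List Int) (mpt_list : List String) : List String :=
  let st := splitStateB param mpt_list
  let out := (PySem.List.enumerate st.1).foldl
    (fun out p =>
      let r := (PySem.List.pyGet? rgs p.1).getD 0
      out ++ p.2 ++ [if r = 0 then param else param ++ PySem.Int.toStr r])
    []
  out ++ st.2

-- ===== PRECONDITION & SPEC =====
-- Pre_ excludes exactly the inputs on which Python A raises IndexError (more occurrences of param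
-- in mpt_list than entries in rgs); B raises the same IndexError there.
def Pre_apply_rgs (param : String) (rgs : List Int) (mpt_list : List String) : Prop :=
  mpt_list.count param ≤ rgs.length
instance (param : String) (rgs : List Int) (mpt_list : List String) : Decidable (Pre_apply_rgs param rgs mpt_list) := by unfold Pre_apply_rgs; infer_instance

def pvWitness_apply_rgs : String × List Int × List String := ("a", [1, 2], ["a", "b", "a"])

def Spec_apply_rgs (param : String) (rgs : List Int) (mpt_list : List String) (out : List String) : Prop := out = apply_rgs_alt param rgs mpt_list
instance (param : String) (rgs : List Int) (mpt_list : List String) (out : List String) : Decidable (Spec_apply_rgs param rgs mpt_list out) := by unfold Spec_apply_rgs; infer_instance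

-- ===== CLAIM (what is proved, stated in full; the proofs are below) =====
def Claim_equal_apply_rgs : Prop := ∀ (param : String) (rgs : List Int) (mpt_list : List String), Dom_apply_rgs param rgs mpt_list → Pre_apply_rgs param rgs mpt_list → Spec_apply_rgs param rgs mpt_list (apply_rgs param rgs mpt_list)

-- ===== LEMMAS AND PROOFS =====

-- Common structural form both ports are reduced to.
def coreRgs (param : String) : List Int → List String → List String
  | _, [] => []
  | rgs, e :: rest =>
    if e = param then
      (let r := (rgs[0]?).getD 0
       if r = 0 then e else e ++ PySem.Int.toStr r) :: coreRgs param rgs.tail rest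
    else e :: coreRgs param rgs rest

-- ---- A reduces to coreRgs ----
theorem loopA_eq_core (param : String) (rgs : List Int) (l : List String) :
    ∀ k : Nat, applyRgsLoopA param rgs k l = coreRgs param (rgs.drop k) l := by
  induction l with
  | nil => intro k; simp [applyRgsLoopA, coreRgs]
  | cons e rest ih =>
    intro k
    by_cases he : e = param
    · simp only [applyRgsLoopA, coreRgs, he, PySem.List.pyGet?_natCast,
        List.getElem?_drop, Nat.add_zero, List.tail_drop, ih]
    · simp [applyRgsLoopA, coreRgs, he, ih k]

-- ---- B reduces to coreRgs ----
-- Recursive characterisation of the splitting fold, C = the segment accumulated so far.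
def segsC (param : String) : List String → List String → List (List String) × List String
  | [], C => ([], C)
  | e :: rest, C =>
    if e = param then
      let p := segsC param rest []
      (C :: p.1, p.2)
    else segsC param rest (C ++ [e])

theorem foldl_segs (param : String) (l : List String) :
    ∀ (S : List (List String)) (C : List String),
      l.foldl
        (fun st e => if e = param then (st.1 ++ [st.2], ([] : List String)) else (st.1, st.2 ++ [e]))
        (S, C)
      = (S ++ (segsC param l C).1, (segsC param l C).2) := by
  induction l with
  | nil => intro S C; simp [segsC]
  | cons e rest ih =>
    intro S C
    by_cases he : e = param
    · simp [he, segsC, ih]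
    · simp [he, segsC, ih]

-- Recursive characterisation of the reassembling fold (Nat index t).
def asmR (param : String) (rgs : List Int) : Nat → List (List String) → List String
  | _, [] => []
  | t, seg :: segs =>
    (seg ++ [if ((rgs[t]?).getD 0) = 0 then param
             else param ++ PySem.Int.toStr ((rgs[t]?).getD 0)]) ++ asmR param rgs (t + 1) segs

theorem foldl_asm (param : String) (rgs : List Int) (segs : List (List String)) :
    ∀ (t : Nat) (out : List String),
      (PySem.List.enumerate segs (t : Int)).foldl
        (fun out p =>
          out ++ p.2 ++
            [if (PySem.List.pyGet? rgs p.1).getD 0 = 0 then param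
             else param ++ PySem.Int.toStr ((PySem.List.pyGet? rgs p.1).getD 0)])
        out
      = out ++ asmR param rgs t segs := by
  induction segs with
  | nil => intro t out; simp [PySem.List.enumerate_nil, asmR]
  | cons seg segs ih =>
    intro t out
    have h1 : ((t : Int) + 1) = ((t + 1 : Nat) : Int) := by push_cast; ring
    rw [PySem.List.enumerate_cons, List.foldl_cons, h1]
    simp only [PySem.List.pyGet?_natCast, ih (t + 1), asmR]
    by_cases hr : ((rgs[t]?).getD 0) = 0 <;> simp [hr]

-- Main invariant: reassembling the split of l (with pending segment C) yields C ++ coreRgs.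
theorem asm_segs_core (param : String) (rgs : List Int) (l : List String) :
    ∀ (t : Nat) (C : List String),
      asmR param rgs t (segsC param l C).1 ++ (segsC param l C).2
      = C ++ coreRgs param (rgs.drop t) l := by
  induction l with
  | nil => intro t C; simp [segsC, asmR, coreRgs]
  | cons e rest ih =>
    intro t C
    by_cases he : e = param
    · have hget : (rgs.drop t)[0]? = rgs[t]? := by
        rw [List.getElem?_drop, Nat.add_zero]
      have h2 := ih (t + 1) []
      simp only [List.nil_append] at h2
      simp only [segsC, he, coreRgs, asmR, hget, List.tail_drop, if_pos]
      by_cases hr : ((rgs[t]?).getD 0) = 0 <;>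
        simp [hr, List.append_assoc, h2]
    · simp only [segsC, if_neg he]
      rw [ih t (C ++ [e])]
      simp [coreRgs, he]

theorem altB_eq_core (param : String) (rgs : List Int) (l : List String) :
    apply_rgs_alt param rgs l = coreRgs param rgs l := by
  have hsplit := foldl_segs param l [] []
  have ha := foldl_asm param rgs (segsC param l []).1 0 []
  rw [Nat.cast_zero, List.nil_append] at ha
  simp only [apply_rgs_alt, splitStateB, hsplit, List.nil_append]
  rw [ha]
  simpa using asm_segs_core param rgs l 0 []

-- ===== VERDICT (by name: the statement is the Claim_ definition above) =====
theorem apply_rgs_spec : Claim_equal_apply_rgs := by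
  intro param rgs mpt_list _ _
  unfold Spec_apply_rgs apply_rgs
  rw [altB_eq_core, loopA_eq_core]
  simp
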